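-- pv_equiv track=rewrite | github.com/userj81/agency-swarm | examples/software_development_agency/QATester/tools/GenerateTestCasesTool.py | _group_test_cases
-- ===== SOURCE A (Python) =====
-- def _group_test_cases(test_cases: list) -> dict:
--     """Group test cases by function/class."""
--     grouped = {}
--
--     for tc in test_cases:
--         key = f"{tc['class'] or 'module'}.{tc['function']}"
--         if key not in grouped:
--             grouped[key] = []
--         grouped[key].append(tc)
--
--     return grouped
-- ===== SOURCE B (Python) =====
-- def _group_test_cases(test_cases: list) -> dict:
--     """Group test cases by function/class."""
--     def key(tc):
--         return f"{tc['class'] or 'module'}.{tc['function']}"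
--
--     ordered_keys = list(dict.fromkeys(key(tc) for tc in test_cases))
--     return {k: [tc for tc in test_cases if key(tc) == k] for k in ordered_keys}
-- ===== Notes on version B (the rewrite author's own statement) =====
-- stated objective: alternative
-- what changed: A builds the grouped dict in one pass with conditional key initialisation and in-place appends; B first computes the ordered list of distinct keys with dict.fromkeys and then builds the result as a dict comprehension that filters the input list once per key.
import Mathlib
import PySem

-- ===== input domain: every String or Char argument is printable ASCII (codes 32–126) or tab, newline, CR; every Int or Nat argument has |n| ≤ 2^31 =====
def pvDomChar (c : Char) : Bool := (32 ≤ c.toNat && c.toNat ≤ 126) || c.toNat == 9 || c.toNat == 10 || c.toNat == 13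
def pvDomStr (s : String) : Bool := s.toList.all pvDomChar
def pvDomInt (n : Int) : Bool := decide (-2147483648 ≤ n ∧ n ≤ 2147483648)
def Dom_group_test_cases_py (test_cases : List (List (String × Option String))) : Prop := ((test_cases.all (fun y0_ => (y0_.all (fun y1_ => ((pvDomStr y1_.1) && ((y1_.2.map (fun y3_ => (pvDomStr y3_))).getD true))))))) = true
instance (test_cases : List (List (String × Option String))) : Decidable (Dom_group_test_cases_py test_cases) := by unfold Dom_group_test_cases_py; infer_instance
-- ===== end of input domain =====

-- B groups by first computing the ordered distinct keys (dict.fromkeys) and then filtering the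
-- input once per key, instead of A's single pass that conditionally initialises and appends.

-- key = f"{tc['class'] or 'module'}.{tc['function']}", shared by both Pythons verbatim.
-- Lookups are totalised with defaults; Pre_ excludes the inputs where Python raises KeyError.
def pvKey (tc : List (String × Option String)) : String :=
  let cls : String :=
    match (PySem.Dict.mk tc).get? "class" with
    | some (some s) => if s = "" then "module" else s   -- '' is falsy → 'module'
    | some none => "module"                             -- None is falsy → 'module'
    | none => "module"                                  -- KeyError: outside Pre_
  let fn : String :=
    match (PySem.Dict.mk tc).get? "function" with
    | some (some s) => s
    | some none => "None"                               -- f"{None}" = "None"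
    | none => ""                                        -- KeyError: outside Pre_
  cls ++ "." ++ fn

-- ===== PORT A =====
def group_test_cases_py (test_cases : List (List (String × Option String))) : List (String × List (List (String × Option String))) :=
  (test_cases.foldl
    (fun grouped tc =>
      let key := pvKey tc
      let grouped := if grouped.contains key then grouped else grouped.insert key []
      grouped.modify key [] (fun g => g ++ [tc]))   -- grouped[key].append(tc)
    PySem.Dict.empty).items

-- ===== PORT B =====
def group_test_cases_py_alt (test_cases : List (List (String × Option String))) : List (String × List (List (String × Option String))) :=
  let orderedKeys := PySem.List.dedup (test_cases.map pvKey)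
  orderedKeys.map (fun k => (k, test_cases.filter (fun tc => pvKey tc == k)))

-- ===== PRECONDITION & SPEC =====
-- Pre_ excludes exactly the test cases missing a 'class' or 'function' key, on which A raises KeyError.
def Pre_group_test_cases_py (test_cases : List (List (String × Option String))) : Prop :=
  ∀ tc ∈ test_cases, "class" ∈ tc.map Prod.fst ∧ "function" ∈ tc.map Prod.fst
instance (test_cases : List (List (String × Option String))) : Decidable (Pre_group_test_cases_py test_cases) := by unfold Pre_group_test_cases_py; infer_instance
def pvWitness_group_test_cases_py : (List (List (String × Option String))) :=
  [[("class", none), ("function", some "f")], [("class", some "C"), ("function", some "f")]]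

def Spec_group_test_cases_py (test_cases : List (List (String × Option String))) (out : List (String × List (List (String × Option String)))) : Prop := out = group_test_cases_py_alt test_cases
instance (test_cases : List (List (String × Option String))) (out : List (String × List (List (String × Option String)))) : Decidable (Spec_group_test_cases_py test_cases out) := by unfold Spec_group_test_cases_py; infer_instance

-- ===== CLAIM (what is proved, stated in full; the proofs are below) =====
def Claim_equal_group_test_cases_py : Prop := ∀ (test_cases : List (List (String × Option String))), Dom_group_test_cases_py test_cases → Pre_group_test_cases_py test_cases → Spec_group_test_cases_py test_cases (group_test_cases_py test_cases)

-- ===== LEMMAS AND PROOFS =====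

-- A's conditional initialisation followed by the append is one Dict.modify step.
theorem step_eq_modify {κ : Type} [BEq κ] [LawfulBEq κ] (d : PySem.Dict κ (List α)) (k : κ) (x : α) :
    (if d.contains k then d else d.insert k []).modify k [] (fun g => g ++ [x])
      = d.modify k [] (fun g => g ++ [x]) := by
  by_cases h : d.contains k
  · simp [h]
  · simp only [h, Bool.false_eq_true, if_false, PySem.Dict.modify,
      PySem.Dict.getD_insert_self, PySem.Dict.insert_insert_self,
      PySem.Dict.getD_of_not_contains _ _ (by simpa using h)]

theorem foldl_step_eq {κ : Type} [BEq κ] [LawfulBEq κ] (key : β → κ) (l : List β) (d : PySem.Dict κ (List β)) :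
    l.foldl (fun grouped tc =>
        (if grouped.contains (key tc) then grouped else grouped.insert (key tc) []).modify
          (key tc) [] (fun g => g ++ [tc])) d
      = l.foldl (fun grouped tc => grouped.modify (key tc) [] (fun g => g ++ [tc])) d := by
  simp only [step_eq_modify]

-- ===== VERDICT (by name: the statement is the Claim_ definition above) =====

theorem group_test_cases_py_spec : Claim_equal_group_test_cases_py := by
  intro test_cases _ _
  unfold Spec_group_test_cases_py group_test_cases_py group_test_cases_py_alt
  rw [foldl_step_eq pvKey]
  have hfold : test_cases.foldl (fun grouped tc => grouped.modify (pvKey tc) [] (fun g => g ++ [tc])) PySem.Dict.empty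
      = (test_cases.map (fun tc => (pvKey tc, tc))).foldl (fun d p => d.modify p.1 [] (fun g => g ++ [p.2])) PySem.Dict.empty := by
    rw [List.foldl_map]
  rw [hfold]
  set D := (test_cases.map (fun tc => (pvKey tc, tc))).foldl (fun d p => d.modify p.1 [] (fun g => g ++ [p.2])) PySem.Dict.empty with hD
  have hkeys : D.keys = PySem.List.dedup (test_cases.map pvKey) := by
    rw [hD, List.foldl_map (f := fun tc => (pvKey tc, tc))]
    have := PySem.Dict.keys_foldl_modify_key test_cases pvKey ([] : List (List (String × Option String)))
      (fun _ tc => fun g => g ++ [tc]) PySem.Dict.empty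
    simpa [PySem.List.dedup_eq_ofList, PySem.Set.ofList] using this
  have hnodup : D.keys.Nodup := by
    rw [hkeys]; exact PySem.List.nodup_dedup _
  rw [PySem.Dict.items_eq_map_keys D hnodup [], hkeys]
  refine List.map_congr_left (fun k _ => ?_)
  have hget := PySem.Dict.getD_foldl_modify_append (test_cases.map (fun tc => (pvKey tc, tc))) PySem.Dict.empty k
  rw [hD, hget]
  simp [List.filter_map, Function.comp_def]
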